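-- pv_equiv track=rewrite | github.com/HaoJiang/LeetCode- | Leetcode/261. Graph Valid Tree(Medium).py | gvt
-- ===== SOURCE A (Python) =====
-- def gvt(n, edges):
--     from collections import defaultdict, deque
--
--     if len(edges) != n - 1:
--         return False
--
--     mp = defaultdict(set)
--
--     for i in edges:
--         mp[i[0]].add(i[1])
--         mp[i[1]].add(i[0])
--
--     dq = deque()
--     dq.append(0)
--     visited = set()
--     while dq:
--         node = dq.popleft()
--         visited.add(node)
--
--         for i in mp[node]:
--             if i not in visited:
--                 dq.append(i)
--                 visited.add(i)
--
--     return len(visited) == n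
-- ===== SOURCE B (Python) =====
-- def gvt(n, edges):
--     if len(edges) != n - 1:
--         return False
--     comp = {0}
--     changed = True
--     while changed:
--         changed = False
--         for e in edges:
--             if (e[0] in comp) != (e[1] in comp):
--                 comp.add(e[0])
--                 comp.add(e[1])
--                 changed = True
--     return len(comp) == n
-- ===== Notes on version B (the rewrite author's own statement) =====
-- stated objective: alternative
-- what changed: Replaces A's adjacency-dict + BFS queue with a queue-free fixpoint: repeatedly sweep the raw edge list, absorbing into node 0's component every edge with exactly one endpoint inside, until a sweep changes nothing, then compare the component's size with n.
import Mathlib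
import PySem

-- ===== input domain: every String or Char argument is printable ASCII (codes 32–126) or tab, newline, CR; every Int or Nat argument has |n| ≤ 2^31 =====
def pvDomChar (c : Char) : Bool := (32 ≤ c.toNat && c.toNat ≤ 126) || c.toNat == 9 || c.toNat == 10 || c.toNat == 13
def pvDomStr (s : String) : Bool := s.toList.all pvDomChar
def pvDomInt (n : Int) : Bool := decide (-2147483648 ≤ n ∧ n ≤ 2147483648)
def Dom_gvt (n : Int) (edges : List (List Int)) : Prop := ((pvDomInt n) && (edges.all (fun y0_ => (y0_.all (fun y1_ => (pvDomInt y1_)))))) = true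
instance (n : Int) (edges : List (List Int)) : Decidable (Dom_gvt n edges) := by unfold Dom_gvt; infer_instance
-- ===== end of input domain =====

-- B replaces A's adjacency-dict + BFS queue by a queue-free fixpoint over the raw edge list
-- (same results; no speed claim).

-- ===== PORT A =====
-- `mp[i[0]].add(i[1])` on a defaultdict(set).  The BFS later reads `mp[node]`; a defaultdict
-- read inserts an empty set, which cannot change the result, so the port reads with a default.
def gvtAddEdge (mp : PySem.Dict Int (PySem.Set Int)) (e : List Int) : PySem.Dict Int (PySem.Set Int) :=
  match PySem.List.pyGet? e 0, PySem.List.pyGet? e 1 with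
  | some u, some v =>
    let mp1 := mp.insert u (PySem.Set.add (mp.getD u PySem.Set.empty) v)
    mp1.insert v (PySem.Set.add (mp1.getD v PySem.Set.empty) u)
  | _, _ => mp  -- unreachable under Pre_gvt: Python raises IndexError here

-- body of `for i in mp[node]: if i not in visited: dq.append(i); visited.add(i)`
-- (Python iterates a set in hash order; only membership of `visited` is ever used afterwards,
-- so the result does not depend on that order and the port iterates in the Set's list order)
def gvtStep (p : List Int × PySem.Set Int) (i : Int) : List Int × PySem.Set Int :=
  if PySem.Set.contains p.2 i then p else (p.1 ++ [i], PySem.Set.add p.2 i)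

-- `while dq:` loop; fuel is a termination guard only (4*|edges|+4 is proved sufficient below)
def gvtBFS (mp : PySem.Dict Int (PySem.Set Int)) : Nat → List Int → PySem.Set Int → PySem.Set Int
  | 0, _, vis => vis
  | _+1, [], vis => vis
  | f+1, node :: dq, vis =>
    let vis' := PySem.Set.add vis node
    let st := (PySem.Dict.getD mp node PySem.Set.empty).foldl gvtStep (dq, vis')
    gvtBFS mp f st.1 st.2

def gvt (n : Int) (edges : List (List Int)) : Bool :=
  if (edges.length : Int) ≠ n - 1 then false
  else
    let mp := edges.foldl gvtAddEdge PySem.Dict.empty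
    let visited := gvtBFS mp (4 * edges.length + 4) [0] PySem.Set.empty
    PySem.Set.len visited == n

-- ===== PORT B =====
-- body of `for e in edges: if (e[0] in comp) != (e[1] in comp): comp.add(e[0]); comp.add(e[1]); changed = True`
def gvtSweepStep (p : PySem.Set Int × Bool) (e : List Int) : PySem.Set Int × Bool :=
  match PySem.List.pyGet? e 0, PySem.List.pyGet? e 1 with
  | some u, some v =>
    if PySem.Set.contains p.1 u ≠ PySem.Set.contains p.1 v then
      (PySem.Set.add (PySem.Set.add p.1 u) v, true)
    else p
  | _, _ => p  -- unreachable under Pre_gvt: Python raises IndexError here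

def gvtSweep (edges : List (List Int)) (comp : PySem.Set Int) : PySem.Set Int × Bool :=
  edges.foldl gvtSweepStep (comp, false)

-- `while changed:` loop; fuel is a termination guard only (2*|edges|+2 is proved sufficient below)
def gvtIter (edges : List (List Int)) : Nat → PySem.Set Int → PySem.Set Int
  | 0, comp => comp
  | f+1, comp =>
    let st := gvtSweep edges comp
    if st.2 then gvtIter edges f st.1 else st.1

def gvt_alt (n : Int) (edges : List (List Int)) : Bool :=
  if (edges.length : Int) ≠ n - 1 then false
  else
    let comp := gvtIter edges (2 * edges.length + 2) (PySem.Set.ofList [0])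
    PySem.Set.len comp == n

-- ===== PRECONDITION & SPEC =====
-- Pre_ excludes exactly the inputs where Python raises IndexError: an edge with fewer than two
-- entries is only touched (i[0], i[1] / e[0], e[1]) after the `len(edges) == n-1` guard passes.
def Pre_gvt (n : Int) (edges : List (List Int)) : Prop :=
  (edges.length : Int) = n - 1 → ∀ e ∈ edges, 2 ≤ e.length
instance (n : Int) (edges : List (List Int)) : Decidable (Pre_gvt n edges) := by
  unfold Pre_gvt; infer_instance

def pvWitness_gvt : Int × List (List Int) := (3, [[0, 1], [1, 2]])

def Spec_gvt (n : Int) (edges : List (List Int)) (out : Bool) : Prop := out = gvt_alt n edges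
instance (n : Int) (edges : List (List Int)) (out : Bool) : Decidable (Spec_gvt n edges out) := by
  unfold Spec_gvt; infer_instance

-- ===== CLAIM (what is proved, stated in full; the proofs are below) =====
def Claim_equal_gvt : Prop := ∀ (n : Int) (edges : List (List Int)), Dom_gvt n edges → Pre_gvt n edges → Spec_gvt n edges (gvt n edges)

-- ===== LEMMAS AND PROOFS =====

-- the undirected adjacency relation of the edge list, and reachability from node 0
def gvtConn (e : List Int) (u v : Int) : Prop :=
  (PySem.List.pyGet? e 0 = some u ∧ PySem.List.pyGet? e 1 = some v) ∨
  (PySem.List.pyGet? e 0 = some v ∧ PySem.List.pyGet? e 1 = some u)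

def EAdj (edges : List (List Int)) (u v : Int) : Prop := ∃ e ∈ edges, gvtConn e u v

inductive Reach (edges : List (List Int)) : Int → Prop
  | zero : Reach edges 0
  | step {u v : Int} : Reach edges u → EAdj edges u v → Reach edges v

-- the finite universe every discovered node lives in: 0 plus all edge endpoints
def nodeS (edges : List (List Int)) : Finset Int :=
  insert 0 (edges.flatMap
    (fun e => (PySem.List.pyGet? e 0).toList ++ (PySem.List.pyGet? e 1).toList)).toFinset

lemma mem_nodeS (edges : List (List Int)) (x : Int) :
    x ∈ nodeS edges ↔ x = 0 ∨ ∃ e ∈ edges,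
      PySem.List.pyGet? e 0 = some x ∨ PySem.List.pyGet? e 1 = some x := by
  simp only [nodeS, Finset.mem_insert, List.mem_toFinset, List.mem_flatMap, List.mem_append,
    Option.mem_toList]

lemma nodeS_card_le (edges : List (List Int)) :
    (nodeS edges).card ≤ 2 * edges.length + 1 := by
  have h2 : (edges.flatMap
      (fun e => (PySem.List.pyGet? e 0).toList ++ (PySem.List.pyGet? e 1).toList)).length
      ≤ 2 * edges.length := by
    induction edges with
    | nil => simp
    | cons e es ih =>
      simp only [List.flatMap_cons, List.length_append, List.length_cons]
      have a0 : (PySem.List.pyGet? e 0).toList.length ≤ 1 := by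
        cases PySem.List.pyGet? e 0 <;> simp
      have a1 : (PySem.List.pyGet? e 1).toList.length ≤ 1 := by
        cases PySem.List.pyGet? e 1 <;> simp
      omega
  have h1 := List.toFinset_card_le (edges.flatMap
      (fun e => (PySem.List.pyGet? e 0).toList ++ (PySem.List.pyGet? e 1).toList))
  have h0 := Finset.card_insert_le (0:Int) (edges.flatMap
      (fun e => (PySem.List.pyGet? e 0).toList ++ (PySem.List.pyGet? e 1).toList)).toFinset
  simp only [nodeS]
  omega

lemma EAdj_memS (edges : List (List Int)) (u v : Int) (h : EAdj edges u v) :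
    u ∈ nodeS edges ∧ v ∈ nodeS edges := by
  obtain ⟨e, he, hc⟩ := h
  rcases hc with ⟨h0, h1⟩ | ⟨h0, h1⟩ <;>
    exact ⟨(mem_nodeS edges u).mpr (Or.inr ⟨e, he, by tauto⟩),
           (mem_nodeS edges v).mpr (Or.inr ⟨e, he, by tauto⟩)⟩

lemma EAdj_symm (edges : List (List Int)) (u v : Int) (h : EAdj edges u v) : EAdj edges v u := by
  obtain ⟨e, he, hc⟩ := h
  exact ⟨e, he, hc.symm⟩

lemma nodup_len_le_card (vis : List Int) (S : Finset Int) (hnd : vis.Nodup)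
    (hS : ∀ x ∈ vis, x ∈ S) : vis.length ≤ S.card := by
  have hc := List.toFinset_card_of_nodup hnd
  have hsub : vis.toFinset ⊆ S := fun x hx => hS x (List.mem_toFinset.mp hx)
  have := Finset.card_le_card hsub
  omega

lemma len_le_add (s : PySem.Set Int) (x : Int) : s.length ≤ (PySem.Set.add s x).length := by
  rw [PySem.Set.add_eq_ite]
  split <;> simp

lemma reach_mem (edges : List (List Int)) (r : List Int) (h0 : (0:Int) ∈ r)
    (hcl : ∀ u ∈ r, ∀ v, EAdj edges u v → v ∈ r) : ∀ x, Reach edges x → x ∈ r := by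
  intro x hx
  induction hx with
  | zero => exact h0
  | step hr hadj ih => exact hcl _ ih _ hadj

-- ---- A side ----

lemma mem_adjFold (edges : List (List Int)) : ∀ (d : PySem.Dict Int (PySem.Set Int)) (u v : Int),
    v ∈ PySem.Dict.getD (edges.foldl gvtAddEdge d) u PySem.Set.empty ↔
    v ∈ PySem.Dict.getD d u PySem.Set.empty ∨ EAdj edges u v := by
  induction edges with
  | nil => simp [EAdj]
  | cons e es ih =>
    intro d u v
    rw [List.foldl_cons, ih (gvtAddEdge d e) u v]
    have hE : EAdj (e :: es) u v ↔ gvtConn e u v ∨ EAdj es u v := by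
      simp [EAdj, List.mem_cons, or_and_right, exists_or]
    have hstep : v ∈ PySem.Dict.getD (gvtAddEdge d e) u PySem.Set.empty ↔
        v ∈ PySem.Dict.getD d u PySem.Set.empty ∨ gvtConn e u v := by
      cases h0 : PySem.List.pyGet? e 0 with
      | none => simp [gvtAddEdge, h0, gvtConn]
      | some a =>
        cases h1 : PySem.List.pyGet? e 1 with
        | none => simp [gvtAddEdge, h0, h1, gvtConn]
        | some b =>
          simp only [gvtAddEdge, h0, h1]
          by_cases hub : u = b <;> by_cases hua : u = a
          · have hab : a = b := hua.symm.trans hub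
            simp [hub, hab, PySem.Set.mem_add, gvtConn, h0, h1, eq_comm]
          · have hab : ¬ a = b := fun hh => hua (hub.trans hh.symm)
            simp [PySem.Dict.getD_insert, hub, hab, PySem.Set.mem_add, gvtConn, h0, h1, eq_comm]
          · have hab : ¬ a = b := fun hh => hub (hua.trans hh)
            simp [PySem.Dict.getD_insert, hua, hab, PySem.Set.mem_add, gvtConn, h0, h1, eq_comm]
          · simp [PySem.Dict.getD_insert, hub, hua, gvtConn, h0, h1, eq_comm]
    rw [hE, hstep]
    tauto

lemma gvtStep_fold (ns : List Int) : ∀ (dq : List Int) (vis : PySem.Set Int), vis.Nodup →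
    (ns.foldl gvtStep (dq, vis)).2.Nodup
    ∧ (∀ x ∈ vis, x ∈ (ns.foldl gvtStep (dq, vis)).2)
    ∧ (∀ x ∈ dq, x ∈ (ns.foldl gvtStep (dq, vis)).1)
    ∧ (∀ x ∈ ns, x ∈ (ns.foldl gvtStep (dq, vis)).2)
    ∧ (∀ x ∈ (ns.foldl gvtStep (dq, vis)).1, x ∈ dq ∨ x ∈ ns)
    ∧ (∀ x ∈ (ns.foldl gvtStep (dq, vis)).2, x ∈ vis ∨ x ∈ ns)
    ∧ (∀ x ∈ (ns.foldl gvtStep (dq, vis)).2, x ∈ vis ∨ x ∈ (ns.foldl gvtStep (dq, vis)).1)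
    ∧ (ns.foldl gvtStep (dq, vis)).1.length + vis.length
        = dq.length + (ns.foldl gvtStep (dq, vis)).2.length
    ∧ dq.length ≤ (ns.foldl gvtStep (dq, vis)).1.length := by
  induction ns with
  | nil =>
    intro dq vis hnd
    refine ⟨hnd, fun x h => h, fun x h => h, ?_, fun x h => Or.inl h, fun x h => Or.inl h,
      fun x h => Or.inl h, rfl, le_refl _⟩
    intro x hx
    exact absurd hx (by simp)
  | cons i ns ih =>
    intro dq vis hnd
    rw [List.foldl_cons]
    by_cases h : i ∈ vis
    · have hstep : gvtStep (dq, vis) i = (dq, vis) := by simp [gvtStep, h]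
      rw [hstep]
      obtain ⟨c1, c2, c3, c4, c5, c6, c7, c8, c9⟩ := ih dq vis hnd
      refine ⟨c1, c2, c3, ?_, ?_, ?_, c7, c8, c9⟩
      · intro x hx
        rcases List.mem_cons.mp hx with rfl | hx
        · exact c2 x h
        · exact c4 x hx
      · intro x hx
        rcases c5 x hx with h' | h'
        · exact Or.inl h'
        · exact Or.inr (List.mem_cons_of_mem _ h')
      · intro x hx
        rcases c6 x hx with h' | h'
        · exact Or.inl h'
        · exact Or.inr (List.mem_cons_of_mem _ h')
    · have hstep : gvtStep (dq, vis) i = (dq ++ [i], PySem.Set.add vis i) := by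
        simp [gvtStep, h]
      rw [hstep]
      obtain ⟨c1, c2, c3, c4, c5, c6, c7, c8, c9⟩ :=
        ih (dq ++ [i]) (PySem.Set.add vis i) (PySem.Set.nodup_add vis i hnd)
      have hmemadd : ∀ x : Int, x ∈ PySem.Set.add vis i ↔ x ∈ vis ∨ x = i :=
        fun x => PySem.Set.mem_add vis i x
      have hlenadd : (PySem.Set.add vis i).length = vis.length + 1 := by
        rw [PySem.Set.add_of_not_mem h]; simp
      refine ⟨c1, ?_, ?_, ?_, ?_, ?_, ?_, ?_, ?_⟩
      · intro x hx
        exact c2 x ((hmemadd x).mpr (Or.inl hx))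
      · intro x hx
        exact c3 x (List.mem_append_left _ hx)
      · intro x hx
        rcases List.mem_cons.mp hx with rfl | hx
        · exact c2 x ((hmemadd x).mpr (Or.inr rfl))
        · exact c4 x hx
      · intro x hx
        rcases c5 x hx with h' | h'
        · rcases List.mem_append.mp h' with h'' | h''
          · exact Or.inl h''
          · have : x = i := by simpa using h''
            exact Or.inr (this ▸ List.mem_cons_self)
        · exact Or.inr (List.mem_cons_of_mem _ h')
      · intro x hx
        rcases c6 x hx with h' | h'
        · rcases (hmemadd x).mp h' with h'' | h''
          · exact Or.inl h''
          · exact Or.inr (h'' ▸ List.mem_cons_self)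
        · exact Or.inr (List.mem_cons_of_mem _ h')
      · intro x hx
        rcases c7 x hx with h' | h'
        · rcases (hmemadd x).mp h' with h'' | h''
          · exact Or.inl h''
          · exact Or.inr (c3 x (List.mem_append_right _ (by simp [h''])))
        · exact Or.inr h'
      · simp only [List.length_append, List.length_cons, List.length_nil] at c8
        omega
      · simp only [List.length_append, List.length_cons, List.length_nil] at c9
        omega

lemma bfs_main (edges : List (List Int)) (mp : PySem.Dict Int (PySem.Set Int))
    (Hadj : ∀ u v : Int, v ∈ PySem.Dict.getD mp u PySem.Set.empty ↔ EAdj edges u v) :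
    ∀ (f : Nat) (q : List Int) (vis : PySem.Set Int),
    vis.Nodup →
    (∀ x ∈ vis, x ∈ nodeS edges) → (∀ x ∈ q, x ∈ nodeS edges) →
    (∀ x ∈ vis, Reach edges x) → (∀ x ∈ q, Reach edges x) →
    (∀ u ∈ vis, u ∈ q ∨ ∀ v, EAdj edges u v → v ∈ vis) →
    ((0:Int) ∈ q ∨ (0:Int) ∈ vis) →
    q.length + 2 * (nodeS edges).card < f + 2 * vis.length →
    (gvtBFS mp f q vis).Nodup ∧ (0:Int) ∈ gvtBFS mp f q vis
    ∧ (∀ x ∈ gvtBFS mp f q vis, Reach edges x)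
    ∧ (∀ u ∈ gvtBFS mp f q vis, ∀ v, EAdj edges u v → v ∈ gvtBFS mp f q vis) := by
  intro f
  induction f with
  | zero =>
    intro q vis hnd hvS hqS hvR hqR hC hZ hmeas
    have hle := nodup_len_le_card vis (nodeS edges) hnd hvS
    exact absurd hmeas (by omega)
  | succ f ih =>
    intro q vis hnd hvS hqS hvR hqR hC hZ hmeas
    cases q with
    | nil =>
      have hret : gvtBFS mp (f + 1) [] vis = vis := rfl
      rw [hret]
      refine ⟨hnd, ?_, hvR, ?_⟩
      · rcases hZ with h | h
        · exact absurd h (by simp)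
        · exact h
      · intro u hu v hadj
        rcases hC u hu with h | h
        · exact absurd h (by simp)
        · exact h v hadj
    | cons node dq =>
      have hun : gvtBFS mp (f + 1) (node :: dq) vis =
          gvtBFS mp f
            (((PySem.Dict.getD mp node PySem.Set.empty).foldl gvtStep
              (dq, PySem.Set.add vis node)).1)
            (((PySem.Dict.getD mp node PySem.Set.empty).foldl gvtStep
              (dq, PySem.Set.add vis node)).2) := rfl
      rw [hun]
      obtain ⟨c1, c2, c3, c4, c5, c6, c7, c8, c9⟩ :=
        gvtStep_fold (PySem.Dict.getD mp node PySem.Set.empty) dq (PySem.Set.add vis node)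
          (PySem.Set.nodup_add vis node hnd)
      have hmemadd : ∀ x : Int, x ∈ PySem.Set.add vis node ↔ x ∈ vis ∨ x = node :=
        fun x => PySem.Set.mem_add vis node x
      have hnodeS : node ∈ nodeS edges := hqS node (List.mem_cons_self)
      have hnodeR : Reach edges node := hqR node (List.mem_cons_self)
      have hnsS : ∀ i ∈ PySem.Dict.getD mp node PySem.Set.empty, i ∈ nodeS edges :=
        fun i hi => (EAdj_memS edges node i ((Hadj node i).mp hi)).2
      have hnsR : ∀ i ∈ PySem.Dict.getD mp node PySem.Set.empty, Reach edges i :=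
        fun i hi => Reach.step hnodeR ((Hadj node i).mp hi)
      have hS2 : ∀ x ∈ ((PySem.Dict.getD mp node PySem.Set.empty).foldl gvtStep
          (dq, PySem.Set.add vis node)).2, x ∈ nodeS edges := by
        intro x hx
        rcases c6 x hx with h' | h'
        · rcases (hmemadd x).mp h' with h'' | h''
          · exact hvS x h''
          · exact h'' ▸ hnodeS
        · exact hnsS x h'
      have hS1 : ∀ x ∈ ((PySem.Dict.getD mp node PySem.Set.empty).foldl gvtStep
          (dq, PySem.Set.add vis node)).1, x ∈ nodeS edges := by
        intro x hx
        rcases c5 x hx with h' | h'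
        · exact hqS x (List.mem_cons_of_mem _ h')
        · exact hnsS x h'
      have hR2 : ∀ x ∈ ((PySem.Dict.getD mp node PySem.Set.empty).foldl gvtStep
          (dq, PySem.Set.add vis node)).2, Reach edges x := by
        intro x hx
        rcases c6 x hx with h' | h'
        · rcases (hmemadd x).mp h' with h'' | h''
          · exact hvR x h''
          · exact h'' ▸ hnodeR
        · exact hnsR x h'
      have hR1 : ∀ x ∈ ((PySem.Dict.getD mp node PySem.Set.empty).foldl gvtStep
          (dq, PySem.Set.add vis node)).1, Reach edges x := by
        intro x hx
        rcases c5 x hx with h' | h'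
        · exact hqR x (List.mem_cons_of_mem _ h')
        · exact hnsR x h'
      have hC' : ∀ u ∈ ((PySem.Dict.getD mp node PySem.Set.empty).foldl gvtStep
          (dq, PySem.Set.add vis node)).2,
          u ∈ ((PySem.Dict.getD mp node PySem.Set.empty).foldl gvtStep
            (dq, PySem.Set.add vis node)).1
          ∨ ∀ v, EAdj edges u v → v ∈ ((PySem.Dict.getD mp node PySem.Set.empty).foldl gvtStep
            (dq, PySem.Set.add vis node)).2 := by
        intro u hu
        rcases c7 u hu with h' | h'
        · rcases (hmemadd u).mp h' with h'' | h''
          · rcases hC u h'' with hq | hcl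
            · rcases List.mem_cons.mp hq with rfl | hdq
              · refine Or.inr fun v hadj => c4 v ((Hadj u v).mpr hadj)
              · exact Or.inl (c3 u hdq)
            · exact Or.inr fun v hadj => c2 v ((hmemadd v).mpr (Or.inl (hcl v hadj)))
          · subst h''
            exact Or.inr fun v hadj => c4 v ((Hadj u v).mpr hadj)
        · exact Or.inl h'
      have hZ' : (0:Int) ∈ ((PySem.Dict.getD mp node PySem.Set.empty).foldl gvtStep
            (dq, PySem.Set.add vis node)).1
          ∨ (0:Int) ∈ ((PySem.Dict.getD mp node PySem.Set.empty).foldl gvtStep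
            (dq, PySem.Set.add vis node)).2 := by
        rcases hZ with h | h
        · rcases List.mem_cons.mp h with h0 | hdq
          · exact Or.inr (c2 0 ((hmemadd 0).mpr (Or.inr h0)))
          · exact Or.inl (c3 0 hdq)
        · exact Or.inr (c2 0 ((hmemadd 0).mpr (Or.inl h)))
      have hv' : vis.length ≤ (PySem.Set.add vis node).length := len_le_add vis node
      have hM : ((PySem.Dict.getD mp node PySem.Set.empty).foldl gvtStep
            (dq, PySem.Set.add vis node)).1.length + 2 * (nodeS edges).card
          < f + 2 * ((PySem.Dict.getD mp node PySem.Set.empty).foldl gvtStep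
            (dq, PySem.Set.add vis node)).2.length := by
        simp only [List.length_cons] at hmeas
        omega
      exact ih _ _ c1 hS2 hS1 hR2 hR1 hC' hZ' hM

lemma gvt_core (edges : List (List Int)) :
    (gvtBFS (edges.foldl gvtAddEdge PySem.Dict.empty) (4 * edges.length + 4) [0]
      PySem.Set.empty).Nodup
    ∧ ∀ x, x ∈ gvtBFS (edges.foldl gvtAddEdge PySem.Dict.empty) (4 * edges.length + 4) [0]
        PySem.Set.empty ↔ Reach edges x := by
  have Hadj : ∀ u v : Int,
      v ∈ PySem.Dict.getD (edges.foldl gvtAddEdge PySem.Dict.empty) u PySem.Set.empty ↔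
      EAdj edges u v := by
    intro u v
    rw [mem_adjFold]
    have hempty : PySem.Dict.getD (PySem.Dict.empty : PySem.Dict Int (PySem.Set Int)) u
        PySem.Set.empty = PySem.Set.empty := rfl
    rw [hempty]
    simp [PySem.Set.empty]
  obtain ⟨c1, c2, c3, c4⟩ :=
    bfs_main edges (edges.foldl gvtAddEdge PySem.Dict.empty) Hadj (4 * edges.length + 4)
      [0] PySem.Set.empty
      (by simp [PySem.Set.empty])
      (by simp [PySem.Set.empty])
      (by intro x hx; simp at hx; subst hx; exact Finset.mem_insert_self 0 _)
      (by simp [PySem.Set.empty])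
      (by intro x hx; simp at hx; subst hx; exact Reach.zero)
      (by simp [PySem.Set.empty])
      (Or.inl (by simp))
      (by
        have := nodeS_card_le edges
        simp only [List.length_cons, List.length_nil, PySem.Set.empty]
        omega)
  exact ⟨c1, fun x => ⟨c3 x, reach_mem edges _ c2 c4 x⟩⟩

-- ---- B side ----

lemma sweep_snd_mono (l : List (List Int)) : ∀ p : PySem.Set Int × Bool, p.2 = true →
    (l.foldl gvtSweepStep p).2 = true := by
  induction l with
  | nil => intro p hp; simpa using hp
  | cons e l ih =>
    intro p hp
    rw [List.foldl_cons]
    apply ih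
    cases h0 : PySem.List.pyGet? e 0 with
    | none => simpa [gvtSweepStep, h0] using hp
    | some u =>
      cases h1 : PySem.List.pyGet? e 1 with
      | none => simpa [gvtSweepStep, h0, h1] using hp
      | some v =>
        by_cases hcond : u ∈ p.1 ↔ v ∈ p.1
        · simpa [gvtSweepStep, h0, h1, hcond] using hp
        · simp [gvtSweepStep, h0, h1, hcond]

lemma sweep_fold (edges : List (List Int)) : ∀ (l : List (List Int)) (comp : PySem.Set Int),
    (∀ e ∈ l, e ∈ edges) → comp.Nodup →
    (∀ x ∈ comp, x ∈ nodeS edges) → (∀ x ∈ comp, Reach edges x) →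
    (l.foldl gvtSweepStep (comp, false)).1.Nodup
    ∧ (∀ x ∈ comp, x ∈ (l.foldl gvtSweepStep (comp, false)).1)
    ∧ (∀ x ∈ (l.foldl gvtSweepStep (comp, false)).1, x ∈ nodeS edges)
    ∧ (∀ x ∈ (l.foldl gvtSweepStep (comp, false)).1, Reach edges x)
    ∧ (((l.foldl gvtSweepStep (comp, false)).2 = false
          ∧ (l.foldl gvtSweepStep (comp, false)).1 = comp)
       ∨ ((l.foldl gvtSweepStep (comp, false)).2 = true
          ∧ comp.length < (l.foldl gvtSweepStep (comp, false)).1.length)) := by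
  intro l
  induction l using List.reverseRecOn with
  | nil =>
    intro comp hl hnd hS hR
    exact ⟨hnd, fun x h => h, hS, hR, Or.inl ⟨rfl, rfl⟩⟩
  | append_singleton l e ih =>
    intro comp hl hnd hS hR
    obtain ⟨c1, c2, c3, c4, c5⟩ :=
      ih comp (fun e' he' => hl e' (List.mem_append_left _ he')) hnd hS hR
    have he : e ∈ edges := hl e (List.mem_append_right _ (by simp))
    rw [List.foldl_append]
    simp only [List.foldl_cons, List.foldl_nil]
    cases h0 : PySem.List.pyGet? e 0 with
    | none =>
      have hstep : gvtSweepStep (l.foldl gvtSweepStep (comp, false)) e =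
          l.foldl gvtSweepStep (comp, false) := by
        simp [gvtSweepStep, h0]
      rw [hstep]
      exact ⟨c1, c2, c3, c4, c5⟩
    | some u =>
      cases h1 : PySem.List.pyGet? e 1 with
      | none =>
        have hstep : gvtSweepStep (l.foldl gvtSweepStep (comp, false)) e =
            l.foldl gvtSweepStep (comp, false) := by
          simp [gvtSweepStep, h0, h1]
        rw [hstep]
        exact ⟨c1, c2, c3, c4, c5⟩
      | some v =>
        by_cases hcond : u ∈ (l.foldl gvtSweepStep (comp, false)).1
            ↔ v ∈ (l.foldl gvtSweepStep (comp, false)).1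
        · have hstep : gvtSweepStep (l.foldl gvtSweepStep (comp, false)) e =
              l.foldl gvtSweepStep (comp, false) := by
            simp [gvtSweepStep, h0, h1, hcond]
          rw [hstep]
          exact ⟨c1, c2, c3, c4, c5⟩
        · have hstep : gvtSweepStep (l.foldl gvtSweepStep (comp, false)) e =
              (PySem.Set.add (PySem.Set.add (l.foldl gvtSweepStep (comp, false)).1 u) v,
                true) := by
            simp [gvtSweepStep, h0, h1, hcond]
          rw [hstep]
          have hEuv : EAdj edges u v := ⟨e, he, Or.inl ⟨h0, h1⟩⟩
          have hmem : ∀ x : Int,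
              x ∈ PySem.Set.add (PySem.Set.add (l.foldl gvtSweepStep (comp, false)).1 u) v ↔
              x ∈ (l.foldl gvtSweepStep (comp, false)).1 ∨ x = u ∨ x = v := by
            intro x
            rw [PySem.Set.mem_add, PySem.Set.mem_add]
            tauto
          have hcases : (u ∈ (l.foldl gvtSweepStep (comp, false)).1
                ∧ v ∉ (l.foldl gvtSweepStep (comp, false)).1)
              ∨ (u ∉ (l.foldl gvtSweepStep (comp, false)).1
                ∧ v ∈ (l.foldl gvtSweepStep (comp, false)).1) := by
            by_cases hu : u ∈ (l.foldl gvtSweepStep (comp, false)).1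
              <;> by_cases hv : v ∈ (l.foldl gvtSweepStep (comp, false)).1
            · exact absurd (iff_of_true hu hv) hcond
            · exact Or.inl ⟨hu, hv⟩
            · exact Or.inr ⟨hu, hv⟩
            · exact absurd (iff_of_false hu hv) hcond
          have hRuv : Reach edges u ∧ Reach edges v := by
            rcases hcases with ⟨hu, _⟩ | ⟨_, hv⟩
            · exact ⟨c4 u hu, Reach.step (c4 u hu) hEuv⟩
            · exact ⟨Reach.step (c4 v hv) (EAdj_symm edges u v hEuv), c4 v hv⟩
          have hlen : (l.foldl gvtSweepStep (comp, false)).1.length <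
              (PySem.Set.add (PySem.Set.add (l.foldl gvtSweepStep (comp, false)).1 u)
                v).length := by
            rcases hcases with ⟨hu, hv⟩ | ⟨hu, _⟩
            · rw [PySem.Set.add_of_mem hu, PySem.Set.add_of_not_mem hv]
              simp
            · have h1' := len_le_add (PySem.Set.add (l.foldl gvtSweepStep (comp, false)).1 u) v
              rw [PySem.Set.add_of_not_mem hu] at h1' ⊢
              simp only [List.length_append, List.length_cons, List.length_nil] at h1' ⊢
              omega
          refine ⟨PySem.Set.nodup_add _ v (PySem.Set.nodup_add _ u c1), ?_, ?_, ?_, ?_⟩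
          · intro x hx
            exact (hmem x).mpr (Or.inl (c2 x hx))
          · intro x hx
            rcases (hmem x).mp hx with h' | h' | h'
            · exact c3 x h'
            · exact h' ▸ (EAdj_memS edges u v hEuv).1
            · exact h' ▸ (EAdj_memS edges u v hEuv).2
          · intro x hx
            rcases (hmem x).mp hx with h' | h' | h'
            · exact c4 x h'
            · exact h' ▸ hRuv.1
            · exact h' ▸ hRuv.2
          · refine Or.inr ⟨rfl, ?_⟩
            have hc5 : comp.length ≤ (l.foldl gvtSweepStep (comp, false)).1.length := by
              rcases c5 with ⟨_, heq⟩ | ⟨_, hlt⟩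
              · rw [heq]
              · omega
            show comp.length < (PySem.Set.add
              (PySem.Set.add (l.foldl gvtSweepStep (comp, false)).1 u) v).length
            omega

lemma sweep_false_closed : ∀ (l : List (List Int)) (comp : PySem.Set Int),
    (l.foldl gvtSweepStep (comp, false)).2 = false →
    ∀ e ∈ l, ∀ u v : Int, PySem.List.pyGet? e 0 = some u → PySem.List.pyGet? e 1 = some v →
      (u ∈ comp ↔ v ∈ comp) := by
  intro l
  induction l with
  | nil =>
    intro comp _ e he
    exact absurd he (by simp)
  | cons e' l ih =>
    intro comp hfalse e he u v h0 h1
    rw [List.foldl_cons] at hfalse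
    have hnofire : gvtSweepStep (comp, false) e' = (comp, false) := by
      by_contra hne
      have h2 : (gvtSweepStep (comp, false) e').2 = true := by
        cases h0' : PySem.List.pyGet? e' 0 with
        | none => exact absurd (by simp [gvtSweepStep, h0']) hne
        | some a =>
          cases h1' : PySem.List.pyGet? e' 1 with
          | none => exact absurd (by simp [gvtSweepStep, h0', h1']) hne
          | some b =>
            by_cases hcond : a ∈ comp ↔ b ∈ comp
            · exact absurd (by simp [gvtSweepStep, h0', h1', hcond]) hne
            · simp [gvtSweepStep, h0', h1', hcond]
      have h3 := sweep_snd_mono l (gvtSweepStep (comp, false) e') h2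
      rw [h3] at hfalse
      exact absurd hfalse (by simp)
    rw [hnofire] at hfalse
    rcases List.mem_cons.mp he with rfl | he'
    · by_contra hcond
      have hfire : gvtSweepStep (comp, false) e =
          (PySem.Set.add (PySem.Set.add comp u) v, true) := by
        simp [gvtSweepStep, h0, h1, hcond]
      rw [hfire] at hnofire
      have := congrArg Prod.snd hnofire
      simp at this
    · exact ih comp hfalse e he' u v h0 h1

lemma iter_main (edges : List (List Int)) : ∀ (f : Nat) (comp : PySem.Set Int),
    comp.Nodup → (∀ x ∈ comp, x ∈ nodeS edges) → (∀ x ∈ comp, Reach edges x) →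
    (nodeS edges).card < f + comp.length →
    (∀ x ∈ comp, x ∈ gvtIter edges f comp) ∧ (gvtIter edges f comp).Nodup
    ∧ (∀ x ∈ gvtIter edges f comp, Reach edges x)
    ∧ (gvtSweep edges (gvtIter edges f comp)).2 = false := by
  intro f
  induction f with
  | zero =>
    intro comp hnd hS hR hmeas
    have hle := nodup_len_le_card comp (nodeS edges) hnd hS
    exact absurd hmeas (by omega)
  | succ f ih =>
    intro comp hnd hS hR hmeas
    obtain ⟨c1, c2, c3, c4, c5⟩ := sweep_fold edges edges comp (fun _ he => he) hnd hS hR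
    rcases c5 with ⟨hf, heq⟩ | ⟨ht, hlt⟩
    · have hf' : (gvtSweep edges comp).2 = false := hf
      have heq' : (gvtSweep edges comp).1 = comp := heq
      have hret : gvtIter edges (f + 1) comp = comp := by
        have hdef : gvtIter edges (f + 1) comp =
            if (gvtSweep edges comp).2 then gvtIter edges f (gvtSweep edges comp).1
            else (gvtSweep edges comp).1 := rfl
        rw [hdef, if_neg (by simp [hf']), heq']
      rw [hret]
      exact ⟨fun x h => h, hnd, hR, hf'⟩
    · have ht' : (gvtSweep edges comp).2 = true := ht
      have hrec : gvtIter edges (f + 1) comp = gvtIter edges f (gvtSweep edges comp).1 := by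
        have hdef : gvtIter edges (f + 1) comp =
            if (gvtSweep edges comp).2 then gvtIter edges f (gvtSweep edges comp).1
            else (gvtSweep edges comp).1 := rfl
        rw [hdef, if_pos (by simp [ht'])]
      rw [hrec]
      have hlt2 : comp.length < (gvtSweep edges comp).1.length := hlt
      obtain ⟨d1, d2, d3, d4⟩ := ih (gvtSweep edges comp).1 c1 c3 c4 (by omega)
      exact ⟨fun x hx => d1 x (c2 x hx), d2, d3, d4⟩

lemma alt_core (edges : List (List Int)) :
    (gvtIter edges (2 * edges.length + 2) (PySem.Set.ofList [0])).Nodup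
    ∧ ∀ x, x ∈ gvtIter edges (2 * edges.length + 2) (PySem.Set.ofList [0]) ↔ Reach edges x := by
  have h00 : PySem.Set.ofList [(0:Int)] = [0] := rfl
  obtain ⟨d1, d2, d3, d4⟩ := iter_main edges (2 * edges.length + 2) (PySem.Set.ofList [0])
    (PySem.Set.nodup_ofList [0])
    (by
      intro x hx
      rw [h00] at hx
      have : x = 0 := by simpa using hx
      exact this ▸ Finset.mem_insert_self 0 _)
    (by
      intro x hx
      rw [h00] at hx
      have : x = 0 := by simpa using hx
      exact this ▸ Reach.zero)
    (by
      have := nodeS_card_le edges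
      rw [h00]
      simp only [List.length_cons, List.length_nil]
      omega)
  have h0r : (0:Int) ∈ gvtIter edges (2 * edges.length + 2) (PySem.Set.ofList [0]) :=
    d1 0 (by rw [h00]; simp)
  have hcl : ∀ u ∈ gvtIter edges (2 * edges.length + 2) (PySem.Set.ofList [0]),
      ∀ v, EAdj edges u v → v ∈ gvtIter edges (2 * edges.length + 2) (PySem.Set.ofList [0]) := by
    intro u hu v hadj
    have d4' : (edges.foldl gvtSweepStep
        ((gvtIter edges (2 * edges.length + 2) (PySem.Set.ofList [0])), false)).2 = false := d4
    obtain ⟨e, he, hc⟩ := hadj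
    rcases hc with ⟨he0, he1⟩ | ⟨he0, he1⟩
    · exact (sweep_false_closed edges _ d4' e he u v he0 he1).mp hu
    · exact (sweep_false_closed edges _ d4' e he v u he0 he1).mpr hu
  exact ⟨d2, fun x => ⟨d3 x, reach_mem edges _ h0r hcl x⟩⟩

-- ===== VERDICT (by name: the statement is the Claim_ definition above) =====
theorem gvt_spec : Claim_equal_gvt := by
  intro n edges _hdom _hpre
  unfold Spec_gvt gvt gvt_alt
  split_ifs with h
  · rfl
  · obtain ⟨ndA, mA⟩ := gvt_core edges
    obtain ⟨ndB, mB⟩ := alt_core edges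
    have hperm : (gvtBFS (edges.foldl gvtAddEdge PySem.Dict.empty) (4 * edges.length + 4) [0]
        PySem.Set.empty).Perm (gvtIter edges (2 * edges.length + 2) (PySem.Set.ofList [0])) :=
      (List.perm_ext_iff_of_nodup ndA ndB).mpr (fun a => by rw [mA a, mB a])
    simp only [PySem.Set.len]
    rw [hperm.length_eq]
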